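-- pv_equiv track=rewrite | github.com/francocuervoo/ip | parciales/parcial_02/submission.py | multiplos_de_primos
-- ===== SOURCE A (Python) =====
-- def multiplos_de_primos(v: list[int]) -> dict[int,int]:
--     lista_parcial : list[list[int]] = []
--     res : dict[int,int] = dict()
--
--     for u in v:
--         lista_parcial.append(obtener_primos_que_dividen(u))
--
--     lista_unificada : list[int] = unificar_lista(lista_parcial)
--
--     for numero in lista_unificada:
--         res[numero] = 0
--
--     for dictKey , dictValue in res.items():
--         res[dictKey] = cantidad_de_veces_que_dividie(dictKey, v)
--
--     return res
--
-- def es_primo ( numero : int) -> bool: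
--     if numero < 2:
--         return False
--
--     contador : int = 2
--
--     while not contador == numero:
--         if numero % contador == 0:
--             return False
--         else:
--             contador += 1
--
--     return True
--
-- def obtener_primos_que_dividen ( numero : int) -> list[int]:
--     lista_primos : list[int] = []
--
--     numero_primo : int = 2
--
--     while not numero_primo > numero:
--         if es_primo(numero_primo) and numero % numero_primo == 0:
--             lista_primos.append(numero_primo)
--         numero_primo += 1
--
--     return lista_primos
--
-- def unificar_lista ( lista_numeros : list[list[int]]) -> list[int]:
--     nueva_lista : list[int] = []
--
--     for lista in lista_numeros:
--         for numero in lista: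
--             if not esta_incluido(numero, nueva_lista):
--                 nueva_lista.append(numero)
--
--     return nueva_lista
--
-- def esta_incluido ( elemento : int, conjunto : list[int]) -> bool:
--     for elem in conjunto:
--         if elem == elemento:
--             return True
--     return False
--
-- def cantidad_de_veces_que_dividie ( primo : int, lista_numeros: list[int]) -> int:
--     cantidad : int = 0
--
--     for numero in lista_numeros:
--         if numero % primo == 0:
--             cantidad += 1
--
--     return cantidad
-- ===== SOURCE B (Python) =====
-- def multiplos_de_primos(v: list[int]) -> dict[int, int]:
--     # Trial-division factorization to sqrt(n) per element; first-seen dedup; then count.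
--     seen: list[int] = []
--     for u in v:
--         n = u
--         p = 2
--         while p * p <= n:
--             if n % p == 0:
--                 if p not in seen:
--                     seen.append(p)
--                 while n % p == 0:
--                     n //= p
--             p += 1
--         if n > 1 and n not in seen:
--             seen.append(n)
--     return {p: sum(1 for x in v if x % p == 0) for p in seen}
-- ===== Notes on version B (the rewrite author's own statement) =====
-- stated objective: faster
-- what changed: A finds each element's prime divisors by testing every candidate up to the element with a quadratic trial-division primality test and dedups with a quadratic list merge; B trial-division-factorizes each element up to its square root (stripping each found factor), dedups first-seen on the fly, and counts divisibility once per surviving prime.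
import Mathlib
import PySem

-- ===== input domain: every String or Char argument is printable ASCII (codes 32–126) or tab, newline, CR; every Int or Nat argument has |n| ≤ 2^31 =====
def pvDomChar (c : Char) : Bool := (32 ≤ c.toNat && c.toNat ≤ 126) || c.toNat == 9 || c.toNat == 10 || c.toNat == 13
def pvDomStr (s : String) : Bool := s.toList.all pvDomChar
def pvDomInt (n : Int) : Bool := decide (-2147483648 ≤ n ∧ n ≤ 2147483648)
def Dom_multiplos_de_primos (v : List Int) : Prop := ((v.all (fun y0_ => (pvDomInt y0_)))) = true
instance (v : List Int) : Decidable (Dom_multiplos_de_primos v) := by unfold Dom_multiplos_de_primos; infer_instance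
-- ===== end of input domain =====

-- ===== PORT A =====
-- B replaces A's exhaustive prime search per element by sqrt-bounded trial-division factorization (faster); same return value.
def esPrimoGo (numero : Int) (contador : Int) : Nat → Bool
  | 0 => true
  | fuel+1 =>
    if contador == numero then true
    else if PySem.Int.mod numero contador == 0 then false
    else esPrimoGo numero (contador + 1) fuel

def es_primo (numero : Int) : Bool :=
  if numero < 2 then false
  else esPrimoGo numero 2 numero.toNat

def obtenerGo (numero : Int) : Nat → Int → List Int → List Int
  | 0, _, acc => acc
  | fuel+1, numero_primo, acc =>
    if numero_primo > numero then acc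
    else obtenerGo numero fuel (numero_primo + 1)
      (if es_primo numero_primo && (PySem.Int.mod numero numero_primo == 0) then acc ++ [numero_primo] else acc)

def obtener_primos_que_dividen (numero : Int) : List Int :=
  obtenerGo numero (numero.toNat + 1) 2 []

def esta_incluido (elemento : Int) (conjunto : List Int) : Bool :=
  match conjunto with
  | [] => false
  | elem :: rest => if elem == elemento then true else esta_incluido elemento rest

def unificar_lista (lista_numeros : List (List Int)) : List Int :=
  lista_numeros.foldl
    (fun nueva lista =>
      lista.foldl
        (fun nueva numero => if !(esta_incluido numero nueva) then nueva ++ [numero] else nueva)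
        nueva)
    []

def cantidad_de_veces_que_dividie (primo : Int) (lista_numeros : List Int) : Int :=
  lista_numeros.foldl (fun c numero => if PySem.Int.mod numero primo == 0 then c + 1 else c) 0

def multiplos_de_primos (v : List Int) : List (Int × Int) :=
  let lista_parcial : List (List Int) := v.foldl (fun acc u => acc ++ [obtener_primos_que_dividen u]) []
  let lista_unificada : List Int := unificar_lista lista_parcial
  let res : PySem.Dict Int Int := lista_unificada.foldl (fun d numero => d.insert numero 0) PySem.Dict.empty
  -- Python iterates res.items() while only overwriting values of existing keys: the key sequence is the snapshot below
  let res2 : PySem.Dict Int Int :=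
    res.items.foldl (fun d kv => d.insert kv.1 (cantidad_de_veces_que_dividie kv.1 v)) res
  res2.items

-- ===== PORT B =====
def stripGo (p : Int) : Nat → Int → Int
  | 0, n => n
  | fuel+1, n => if PySem.Int.mod n p == 0 then stripGo p fuel (PySem.Int.floordiv n p) else n

def factorGo : Nat → Int → Int → List Int → Int × List Int
  | 0, n, _, seen => (n, seen)
  | fuel+1, n, p, seen =>
    if p * p ≤ n then
      if PySem.Int.mod n p == 0 then
        factorGo fuel (stripGo p n.toNat n) (p + 1) (if seen.contains p then seen else seen ++ [p])
      else factorGo fuel n (p + 1) seen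
    else (n, seen)

def bStep (seen : List Int) (u : Int) : List Int :=
  let r := factorGo (u.toNat + 2) u 2 seen
  if r.1 > 1 && !(r.2.contains r.1) then r.2 ++ [r.1] else r.2

def countDiv (p : Int) (v : List Int) : Int :=
  ((v.filter (fun x => PySem.Int.mod x p == 0)).length : Int)

def multiplos_de_primos_alt (v : List Int) : List (Int × Int) :=
  (v.foldl bStep []).map (fun p => (p, countDiv p v))

-- ===== PRECONDITION & SPEC =====
def Spec_multiplos_de_primos (v : List Int) (out : List (Int × Int)) : Prop := out = multiplos_de_primos_alt v
instance (v : List Int) (out : List (Int × Int)) : Decidable (Spec_multiplos_de_primos v out) := by unfold Spec_multiplos_de_primos; infer_instance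

-- ===== CLAIM (what is proved, stated in full; the proofs are below) =====
def Claim_equal_multiplos_de_primos : Prop := ∀ (v : List Int), Dom_multiplos_de_primos v → Spec_multiplos_de_primos v (multiplos_de_primos v)

-- ===== LEMMAS AND PROOFS =====

-- the common reference: primes q in [c, c+k) dividing N, increasing, as Ints
def pPred (N q : Nat) : Bool := decide (Nat.Prime q) && decide ((q : Int) ∣ (N : Int))
def pdSeg (N c k : Nat) : List Int := ((List.range' c k).filter (pPred N)).map Int.ofNat
def pListOf (u : Int) : List Int := if u < 2 then [] else pdSeg u.toNat 2 (u.toNat - 1)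
def dedupExt (s l : List Int) : List Int := l.foldl (fun s x => if s.contains x then s else s ++ [x]) s

theorem esta_incluido_eq (e : Int) (s : List Int) : esta_incluido e s = s.contains e := by
  induction s with
  | nil => rfl
  | cons a t ih => simp [esta_incluido, ih, BEq.comm (a := a)]

theorem prime_of_no_small_divisor (N c : Nat) (hc2 : 2 ≤ c) (hcN : c ≤ N)
    (hnd : ∀ k, 2 ≤ k → k < c → ¬ k ∣ N) (hNc : N ≤ c) : Nat.Prime N := by
  rw [Nat.prime_def_lt]
  refine ⟨by omega, fun m hm hdvd => ?_⟩
  by_contra h1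
  have h0 : m ≠ 0 := by rintro rfl; simp at hdvd; omega
  exact hnd m (by omega) (by omega) hdvd

theorem esPrimoGo_correct (fuel : Nat) (N c : Nat) (hc2 : 2 ≤ c) (hcN : c ≤ N)
    (hfuel : N ≤ fuel + c) (hnd : ∀ k, 2 ≤ k → k < c → ¬ k ∣ N) :
    esPrimoGo (N : Int) (c : Int) fuel = decide (Nat.Prime N) := by
  induction fuel generalizing c with
  | zero =>
    have hP : Nat.Prime N := prime_of_no_small_divisor N c hc2 hcN hnd (by omega)
    simp [esPrimoGo, hP]
  | succ fuel ih =>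
    by_cases hceq : c = N
    · have hP : Nat.Prime N := prime_of_no_small_divisor N c hc2 hcN hnd (by omega)
      subst hceq
      simp [esPrimoGo, hP]
    · have hclt : c < N := by omega
      have hne : ((c : Int) == (N : Int)) = false := by
        simp
        omega
      by_cases hdvd : c ∣ N
      · have hnp : ¬ Nat.Prime N := by
          intro hP
          rcases (Nat.Prime.eq_one_or_self_of_dvd hP c hdvd) with h | h <;> omega
        have hmod : N % c = 0 := Nat.dvd_iff_mod_eq_zero.mp hdvd
        simp [esPrimoGo, hne, hmod, hnp]
      · have hmod : N % c ≠ 0 := by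
          intro h
          exact hdvd (Nat.dvd_of_mod_eq_zero h)
        have hcond : (PySem.Int.mod (N : Int) (c : Int) == 0) = false := by
          simp
          omega
        have : esPrimoGo (N : Int) (c : Int) (fuel + 1) = esPrimoGo (N : Int) ((c : Int) + 1) fuel := by
          show (if ((c : Int) == (N : Int)) then true
                else if (PySem.Int.mod (N : Int) (c : Int) == 0) then false
                else esPrimoGo (N : Int) ((c : Int) + 1) fuel) = _
          rw [hne, hcond]
          simp
        rw [this]
        have hcast : ((c : Int) + 1) = ((c + 1 : Nat) : Int) := by push_cast; ring
        rw [hcast]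
        exact ih (c + 1) (by omega) (by omega) (by omega)
          (fun k hk2 hkc => by
            rcases Nat.lt_succ_iff_lt_or_eq.mp hkc with h | h
            · exact hnd k hk2 h
            · subst h; exact hdvd)

theorem es_primo_eq (q : Nat) (h2 : 2 ≤ q) : es_primo (q : Int) = decide (Nat.Prime q) := by
  have hlt : ¬ ((q : Int) < 2) := by omega
  have ht : ((q : Int)).toNat = q := by omega
  unfold es_primo
  rw [if_neg hlt, ht]
  have h22 : ((2 : Int)) = ((2 : Nat) : Int) := by norm_num
  rw [h22]
  exact esPrimoGo_correct q q 2 (by omega) h2 (by omega) (fun k hk2 hkc => by omega)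

theorem pdSeg_zero (N c : Nat) : pdSeg N c 0 = [] := by simp [pdSeg]

theorem pdSeg_succ (N c k : Nat) :
    pdSeg N c (k + 1) = (if pPred N c then [(c : Int)] else []) ++ pdSeg N (c + 1) k := by
  unfold pdSeg
  rw [List.range'_succ]
  by_cases h : pPred N c
  · rw [List.filter_cons_of_pos h]; simp [h]
  · rw [List.filter_cons_of_neg h]; simp [h]

theorem obtenerGo_correct (fuel : Nat) (N c : Nat) (acc : List Int) (hc2 : 2 ≤ c)
    (hfuel : N + 1 ≤ fuel + c) :
    obtenerGo (N : Int) fuel (c : Int) acc = acc ++ pdSeg N c (N + 1 - c) := by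
  induction fuel generalizing c acc with
  | zero =>
    have h0 : N + 1 - c = 0 := by omega
    rw [h0, pdSeg_zero]
    simp [obtenerGo]
  | succ fuel ih =>
    by_cases hgt : N < c
    · have h0 : N + 1 - c = 0 := by omega
      rw [h0, pdSeg_zero]
      have : obtenerGo (N : Int) (fuel + 1) (c : Int) acc = acc := by
        simp [obtenerGo]
        omega
      rw [this]
      exact (List.append_nil acc).symm
    · have hcle : c ≤ N := by omega
      have hk : N + 1 - c = (N + 1 - (c + 1)) + 1 := by omega
      rw [hk, pdSeg_succ]
      have hguard : ¬ ((c : Int) > (N : Int)) := by omega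
      have hguardcond : (es_primo (c : Int) && (PySem.Int.mod (N : Int) (c : Int) == 0)) = pPred N c := by
        rw [es_primo_eq c hc2]
        unfold pPred
        have hdec : (PySem.Int.mod (N : Int) (c : Int) == 0) = decide ((c : Int) ∣ (N : Int)) := by
          by_cases hd : (c : Int) ∣ (N : Int)
          · have hz : N % c = 0 := Nat.dvd_iff_mod_eq_zero.mp (Int.natCast_dvd_natCast.mp hd)
            simp [hd, hz]
          · have hnz : N % c ≠ 0 := fun h => hd (Int.natCast_dvd_natCast.mpr (Nat.dvd_of_mod_eq_zero h))
            simp [hd]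
        rw [hdec]
      have hstep : obtenerGo (N : Int) (fuel + 1) (c : Int) acc =
          obtenerGo (N : Int) fuel ((c : Int) + 1)
            (if pPred N c then acc ++ [(c : Int)] else acc) := by
        rw [show obtenerGo (N : Int) (fuel + 1) (c : Int) acc =
            (if (c : Int) > (N : Int) then acc
             else obtenerGo (N : Int) fuel ((c : Int) + 1)
               (if es_primo (c : Int) && (PySem.Int.mod (N : Int) (c : Int) == 0)
                then acc ++ [(c : Int)] else acc)) from rfl]
        rw [if_neg hguard, hguardcond]
      rw [hstep]
      have hcast : ((c : Int) + 1) = ((c + 1 : Nat) : Int) := by push_cast; ring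
      rw [hcast]
      rw [ih (c + 1) _ (by omega) (by omega)]
      by_cases h : pPred N c <;> simp [h]

theorem obtener_correct (u : Int) : obtener_primos_que_dividen u = pListOf u := by
  by_cases hu : u < 2
  · have h1 : ∃ k, u.toNat + 1 = k + 1 := ⟨u.toNat, rfl⟩
    unfold obtener_primos_que_dividen pListOf
    rw [if_pos hu]
    have : obtenerGo u (u.toNat + 1) 2 [] = [] := by
      show (if (2 : Int) > u then ([] : List Int) else _) = []
      rw [if_pos (by omega)]
    exact this
  · have hu2 : 2 ≤ u := by omega
    have hN : u = ((u.toNat : Nat) : Int) := by omega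
    unfold obtener_primos_que_dividen pListOf
    rw [if_neg hu]
    rw [hN]
    have h2 : ((2 : Int)) = ((2 : Nat) : Int) := by norm_num
    rw [h2, Int.toNat_natCast]
    rw [obtenerGo_correct (u.toNat + 1) u.toNat 2 [] (by omega) (by omega)]
    have : u.toNat + 1 - 2 = u.toNat - 1 := by omega
    rw [this]
    simp

theorem stripGo_correct (fuel : Nat) (n p : Int) (hp : Prime p) (hp2 : 2 ≤ p)
    (hn : 1 ≤ n) (hfuel : n.toNat ≤ fuel + 1) :
    1 ≤ stripGo p fuel n ∧ stripGo p fuel n ∣ n ∧ ¬ p ∣ stripGo p fuel n ∧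
      (∀ q : Int, Prime q → 2 ≤ q → q ≠ p → (q ∣ stripGo p fuel n ↔ q ∣ n)) := by
  induction fuel generalizing n with
  | zero =>
    have hn1 : n = 1 := by omega
    subst hn1
    have hs : stripGo p 0 1 = 1 := rfl
    rw [hs]
    refine ⟨le_refl _, dvd_refl _, ?_, fun q _ _ _ => Iff.rfl⟩
    intro hdp
    have := Int.le_of_dvd (by omega) hdp
    omega
  | succ fuel ih =>
    by_cases hd : p ∣ n
    · have hmod : (PySem.Int.mod n p == 0) = true := by
        simp [PySem.Int.mod_eq_zero_iff_dvd]
        exact hd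
      have hfd : PySem.Int.floordiv n p = n / p := PySem.Int.floordiv_eq_ediv_of_pos (by omega)
      have hpn : p ≤ n := Int.le_of_dvd (by omega) hd
      have hq1 : 1 ≤ n / p := by rw [Int.le_ediv_iff_mul_le (by omega : (0:Int) < p)]; omega
      have hmul : p * (n / p) = n := Int.mul_ediv_cancel' hd
      have hlt : n / p < n := by
        rw [Int.ediv_lt_iff_lt_mul (by omega : (0:Int) < p)]
        nlinarith
      have hstep : stripGo p (fuel + 1) n = stripGo p fuel (n / p) := by
        show (if (PySem.Int.mod n p == 0) then stripGo p fuel (PySem.Int.floordiv n p) else n) = _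
        rw [hmod, hfd]
        simp
      rw [hstep]
      obtain ⟨h1, h2, h3, h4⟩ := ih (n / p) hq1 (by omega)
      have hdvdn : n / p ∣ n := ⟨p, by rw [mul_comm]; exact hmul.symm⟩
      refine ⟨h1, h2.trans hdvdn, h3, fun q hq hq2 hqp => ?_⟩
      rw [h4 q hq hq2 hqp]
      constructor
      · exact fun h => h.trans hdvdn
      · intro hqn
        have hnpq : ¬ q ∣ p := by
          intro hdq
          rcases Int.associated_iff.mp (hq.associated_of_dvd hp hdq) with h | h <;> omega
        have : q ∣ p * (n / p) := by rw [hmul]; exact hqn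
        rcases (hq.dvd_mul.mp this) with h | h
        · exact absurd h hnpq
        · exact h
    · have hmod : (PySem.Int.mod n p == 0) = false := by
        simp [PySem.Int.mod_eq_zero_iff_dvd]
        exact hd
      have hstep : stripGo p (fuel + 1) n = n := by
        show (if (PySem.Int.mod n p == 0) then stripGo p fuel (PySem.Int.floordiv n p) else n) = _
        rw [hmod]
        simp
      rw [hstep]
      exact ⟨hn, dvd_refl _, hd, fun q _ _ _ => Iff.rfl⟩

theorem pdSeg_split (N a k k' : Nat) :
    pdSeg N a (k + k') = pdSeg N a k ++ pdSeg N (a + k) k' := by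
  unfold pdSeg
  have h : List.range' a (k + k') = List.range' a k ++ List.range' (a + k) k' := by
    rw [← List.range'_append]
    simp
  rw [h, List.filter_append, List.map_append]

theorem pdSeg_nil_of (N a k : Nat) (h : ∀ q, a ≤ q → q < a + k → pPred N q = false) :
    pdSeg N a k = [] := by
  unfold pdSeg
  have : (List.range' a k).filter (pPred N) = [] := by
    rw [List.filter_eq_nil_iff]
    intro q hq
    have := List.mem_range'_1.mp hq
    simp [h q this.1 this.2]
  rw [this]
  rfl

theorem filter_eq_singleton {α : Type} (l : List α) (p : α → Bool) (a : α)
    (ha : a ∈ l) (hpa : p a = true) (hu : ∀ x ∈ l, p x = true → x = a) (hnd : l.Nodup) :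
    l.filter p = [a] := by
  induction l with
  | nil => simp at ha
  | cons b t ih =>
    rcases List.mem_cons.mp ha with rfl | hat
    · rw [List.filter_cons_of_pos hpa]
      have : t.filter p = [] := by
        simp only [List.filter_eq_nil_iff]
        intro x hx hpx
        have := hu x (List.mem_cons_of_mem _ hx) hpx
        subst this
        exact (List.nodup_cons.mp hnd).1 hx
      rw [this]
    · have hba : p b = false := by
        by_contra h
        have : b = a := hu b List.mem_cons_self (by simpa using h)
        subst this
        exact (List.nodup_cons.mp hnd).1 hat
      rw [List.filter_cons_of_neg (by simp [hba])]
      exact ih hat (fun x hx hpx => hu x (List.mem_cons_of_mem _ hx) hpx) (List.nodup_cons.mp hnd).2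

theorem dedupExt_append (s l l' : List Int) :
    dedupExt s (l ++ l') = dedupExt (dedupExt s l) l' := by
  unfold dedupExt
  rw [List.foldl_append]

theorem dedupExt_nil (s : List Int) : dedupExt s [] = s := rfl

theorem dedupExt_single (s : List Int) (x : Int) :
    dedupExt s [x] = if s.contains x then s else s ++ [x] := rfl

theorem exit_prime (n p : Int) (hn : 2 ≤ n) (hp2 : 2 ≤ p) (hstop : n < p * p)
    (hnofac : ∀ q : Nat, Nat.Prime q → (q : Int) < p → ¬ (q : Int) ∣ n) :
    Nat.Prime n.toNat := by
  by_contra hnp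
  have hM : n = ((n.toNat : Nat) : Int) := by omega
  have hm := Nat.minFac_prime (show n.toNat ≠ 1 by omega)
  have hmdvd : (n.toNat.minFac : Int) ∣ n := by
    rw [hM]
    exact_mod_cast Int.natCast_dvd_natCast.mpr (Nat.minFac_dvd _)
  have hmp : p ≤ (n.toNat.minFac : Int) := by
    by_contra h
    exact hnofac _ hm (by omega) hmdvd
  have hsq := Nat.minFac_sq_le_self (show 0 < n.toNat by omega) hnp
  have : ((n.toNat.minFac * n.toNat.minFac : Nat) : Int) ≤ n := by
    rw [hM]
    exact_mod_cast (by nlinarith [hsq] : n.toNat.minFac * n.toNat.minFac ≤ n.toNat)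
  push_cast at this
  nlinarith [hmp, this, hstop]

theorem found_prime (n p : Int) (hn : 1 ≤ n) (hp2 : 2 ≤ p) (hd : p ∣ n)
    (hnofac : ∀ q : Nat, Nat.Prime q → (q : Int) < p → ¬ (q : Int) ∣ n) :
    Nat.Prime p.toNat := by
  have hP : p = ((p.toNat : Nat) : Int) := by omega
  have hm := Nat.minFac_prime (show p.toNat ≠ 1 by omega)
  have hmdvdp : ((p.toNat.minFac : Nat) : Int) ∣ p := by
    rw [hP]
    exact_mod_cast Int.natCast_dvd_natCast.mpr (Nat.minFac_dvd _)
  have hmle : p.toNat.minFac ≤ p.toNat := Nat.minFac_le (by omega)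
  by_cases hlt : p.toNat.minFac < p.toNat
  · exact absurd (hmdvdp.trans hd) (hnofac _ hm (by omega))
  · have heq : p.toNat.minFac = p.toNat := by omega
    rw [← heq]
    exact hm

theorem factor_exit (u n p : Int) (seen s0 : List Int)
    (hu : 2 ≤ u) (hp2 : 2 ≤ p) (hn1 : 1 ≤ n) (hdvd : n ∣ u)
    (hpb : p.toNat ≤ u.toNat + 1)
    (hnofac : ∀ q : Nat, Nat.Prime q → (q : Int) < p → ¬ (q : Int) ∣ n)
    (hkeep : ∀ q : Nat, Nat.Prime q → p ≤ (q : Int) → (q : Int) ∣ u → (q : Int) ∣ n)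
    (hstop : n < p * p)
    (hseen : seen = dedupExt s0 (pdSeg u.toNat 2 (p.toNat - 2))) :
    (if n > 1 && !(seen.contains n) then seen ++ [n] else seen) =
      dedupExt s0 (pListOf u) := by
  have hNu : u = ((u.toNat : Nat) : Int) := by omega
  have hsplit : u.toNat - 1 = (p.toNat - 2) + (u.toNat + 1 - p.toNat) := by omega
  have hplist : pListOf u =
      pdSeg u.toNat 2 (p.toNat - 2) ++ pdSeg u.toNat (2 + (p.toNat - 2)) (u.toNat + 1 - p.toNat) := by
    unfold pListOf
    rw [if_neg (by omega), hsplit, pdSeg_split]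
  have h2p : 2 + (p.toNat - 2) = p.toNat := by omega
  rw [h2p] at hplist
  by_cases hone : n = 1
  · subst hone
    have hnil : pdSeg u.toNat p.toNat (u.toNat + 1 - p.toNat) = [] := by
      apply pdSeg_nil_of
      intro q hq1 hq2
      unfold pPred
      by_cases hqp : Nat.Prime q
      · have hqd : ¬ (q : Int) ∣ ((u.toNat : Nat) : Int) := by
          intro h
          have h2 : (q : Int) ∣ u := by rw [hNu]; exact h
          have h3 := hkeep q hqp (by omega) h2
          have h4 := Int.le_of_dvd (by omega) h3
          have h5 := hqp.two_le
          omega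
        simp only [Bool.and_eq_false_iff, decide_eq_false_iff_not]
        right
        exact hqd
      · simp only [Bool.and_eq_false_iff, decide_eq_false_iff_not]
        left
        exact hqp
    rw [hplist, hnil, List.append_nil, ← hseen]
    simp
  · have hn2 : 2 ≤ n := by omega
    have hprime : Nat.Prime n.toNat := exit_prime n p hn2 hp2 hstop hnofac
    have hMn : n = ((n.toNat : Nat) : Int) := by omega
    have hnp : p ≤ n := by
      by_contra h
      exact hnofac n.toNat hprime (by omega) (by rw [← hMn])
    have hnu : n ≤ u := Int.le_of_dvd (by omega) hdvd
    have hsingle : pdSeg u.toNat p.toNat (u.toNat + 1 - p.toNat) = [n] := by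
      unfold pdSeg
      rw [filter_eq_singleton _ _ n.toNat]
      · show [Int.ofNat n.toNat] = [n]
        rw [show Int.ofNat n.toNat = ((n.toNat : Nat) : Int) from rfl, ← hMn]
      · rw [List.mem_range'_1]
        omega
      · unfold pPred
        simp only [Bool.and_eq_true, decide_eq_true_eq]
        refine ⟨hprime, ?_⟩
        rw [← hMn, ← hNu]
        exact hdvd
      · intro x hx hpx
        have hxr := List.mem_range'_1.mp hx
        unfold pPred at hpx
        simp only [Bool.and_eq_true, decide_eq_true_eq] at hpx
        obtain ⟨hxp, hxd⟩ := hpx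
        have hxdu : (x : Int) ∣ u := by rw [hNu]; exact hxd
        have hxdn : (x : Int) ∣ n := hkeep x hxp (by omega) hxdu
        have hxdnn : x ∣ n.toNat := by
          rw [hMn] at hxdn
          exact_mod_cast hxdn
        exact (Nat.prime_dvd_prime_iff_eq hxp hprime).mp hxdnn
      · exact List.nodup_range'
    rw [hplist, hsingle, dedupExt_append, ← hseen, dedupExt_single]
    by_cases hc : n ∈ seen
    · simp [hc]
    · simp [hc]
      omega

theorem factorGo_correct (fuel : Nat) (u n p : Int) (seen s0 : List Int)
    (hu : 2 ≤ u) (hp2 : 2 ≤ p) (hn1 : 1 ≤ n) (hdvd : n ∣ u)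
    (hpb : p.toNat ≤ u.toNat + 1)
    (hnofac : ∀ q : Nat, Nat.Prime q → (q : Int) < p → ¬ (q : Int) ∣ n)
    (hkeep : ∀ q : Nat, Nat.Prime q → p ≤ (q : Int) → (q : Int) ∣ u → (q : Int) ∣ n)
    (hfuel : n.toNat + 2 ≤ fuel + p.toNat)
    (hseen : seen = dedupExt s0 (pdSeg u.toNat 2 (p.toNat - 2))) :
    (let r := factorGo fuel n p seen
     if r.1 > 1 && !(r.2.contains r.1) then r.2 ++ [r.1] else r.2) =
      dedupExt s0 (pListOf u) := by
  induction fuel generalizing n p seen with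
  | zero =>
    have hstop : n < p * p := by
      have h1 : n + 2 ≤ p := by omega
      nlinarith
    show (if n > 1 && !(seen.contains n) then seen ++ [n] else seen) = dedupExt s0 (pListOf u)
    exact factor_exit u n p seen s0 hu hp2 hn1 hdvd hpb hnofac hkeep hstop hseen
  | succ fuel ih =>
    by_cases hloop : p * p ≤ n
    · have hpn : p ≤ n := by nlinarith
      have hnu : n ≤ u := Int.le_of_dvd (by omega) hdvd
      by_cases hd : p ∣ n
      · -- p divides n: p is prime, strip it, record it
        have hmod : (PySem.Int.mod n p == 0) = true := by
          simp [PySem.Int.mod_eq_zero_iff_dvd]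
          exact hd
        have hstep : factorGo (fuel + 1) n p seen =
            factorGo fuel (stripGo p n.toNat n) (p + 1)
              (if seen.contains p then seen else seen ++ [p]) := by
          show (if p * p ≤ n then
                  if (PySem.Int.mod n p == 0)
                  then factorGo fuel (stripGo p n.toNat n) (p + 1)
                    (if seen.contains p then seen else seen ++ [p])
                  else factorGo fuel n (p + 1) seen
                else (n, seen)) = _
          rw [if_pos hloop, hmod]
          simp
        have hPp : Nat.Prime p.toNat := found_prime n p hn1 hp2 hd hnofac
        have hPcast : p = ((p.toNat : Nat) : Int) := by omega
        have hpint : Prime p := by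
          rw [hPcast]
          exact Nat.prime_iff_prime_int.mp hPp
        obtain ⟨hs1, hs2, hs3, hs4⟩ :=
          stripGo_correct n.toNat n p hpint hp2 hn1 (by omega)
        set n' := stripGo p n.toNat n with hn'
        have hn'n : n' ≤ n := Int.le_of_dvd (by omega) hs2
        -- the new seen list
        have hpd : p ∣ u := hd.trans hdvd
        have hPpred : pPred u.toNat p.toNat = true := by
          unfold pPred
          simp only [Bool.and_eq_true, decide_eq_true_eq]
          refine ⟨hPp, ?_⟩
          rw [← hPcast]
          rw [show ((u.toNat : Nat) : Int) = u by omega]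
          exact hpd
        have hseg1 : pdSeg u.toNat p.toNat 1 = [p] := by
          unfold pdSeg
          rw [show List.range' p.toNat 1 = [p.toNat] from rfl,
            List.filter_cons_of_pos hPpred]
          show [Int.ofNat p.toNat] = [p]
          rw [show Int.ofNat p.toNat = ((p.toNat : Nat) : Int) from rfl, ← hPcast]
        have hsegsplit : pdSeg u.toNat 2 ((p + 1).toNat - 2) =
            pdSeg u.toNat 2 (p.toNat - 2) ++ [p] := by
          rw [show (p + 1).toNat - 2 = (p.toNat - 2) + 1 by omega, pdSeg_split,
            show 2 + (p.toNat - 2) = p.toNat by omega, hseg1]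
        have hseen' : (if seen.contains p then seen else seen ++ [p]) =
            dedupExt s0 (pdSeg u.toNat 2 ((p + 1).toNat - 2)) := by
          rw [hsegsplit, dedupExt_append, ← hseen, dedupExt_single]
        rw [hstep]
        exact ih n' (p + 1) _ (by omega) hs1 (hs2.trans hdvd) (by omega)
          (fun q hq hqlt hqd => by
            by_cases hqp : (q : Int) = p
            · rw [hqp] at hqd
              exact hs3 hqd
            · have : (q : Int) < p := by omega
              exact hnofac q hq this ((hs4 (q : Int) (Nat.prime_iff_prime_int.mp hq) (by exact_mod_cast hq.two_le) hqp).mp hqd))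
          (fun q hq hqge hqd => by
            have hqn : (q : Int) ∣ n := hkeep q hq (by omega) hqd
            have hqnp : (q : Int) ≠ p := by omega
            exact (hs4 (q : Int) (Nat.prime_iff_prime_int.mp hq) (by exact_mod_cast hq.two_le) hqnp).mpr hqn)
          (by omega) hseen'
      · -- p does not divide n: move on
        have hmod : (PySem.Int.mod n p == 0) = false := by
          simp [PySem.Int.mod_eq_zero_iff_dvd]
          exact hd
        have hstep : factorGo (fuel + 1) n p seen = factorGo fuel n (p + 1) seen := by
          show (if p * p ≤ n then
                  if (PySem.Int.mod n p == 0)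
                  then factorGo fuel (stripGo p n.toNat n) (p + 1)
                    (if seen.contains p then seen else seen ++ [p])
                  else factorGo fuel n (p + 1) seen
                else (n, seen)) = _
          rw [if_pos hloop, hmod]
          simp
        have hPpred : pPred u.toNat p.toNat = false := by
          unfold pPred
          simp only [Bool.and_eq_false_iff, decide_eq_false_iff_not]
          by_cases hqp : Nat.Prime p.toNat
          · right
            intro hdu
            have hdu' : ((p.toNat : Nat) : Int) ∣ u := by
              rw [show ((u.toNat : Nat) : Int) = u by omega] at hdu
              exact hdu
            have h2 : p ∣ n := by
              have h3 := hkeep p.toNat hqp (by omega) hdu'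
              rwa [show ((p.toNat : Nat) : Int) = p by omega] at h3
            exact hd h2
          · left
            exact hqp
        have hseg1 : pdSeg u.toNat p.toNat 1 = [] := by
          unfold pdSeg
          rw [show List.range' p.toNat 1 = [p.toNat] from rfl,
            List.filter_cons_of_neg (by simp [hPpred])]
          rfl
        have hsegsplit : pdSeg u.toNat 2 ((p + 1).toNat - 2) =
            pdSeg u.toNat 2 (p.toNat - 2) := by
          rw [show (p + 1).toNat - 2 = (p.toNat - 2) + 1 by omega, pdSeg_split,
            show 2 + (p.toNat - 2) = p.toNat by omega, hseg1, List.append_nil]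
        rw [hstep]
        exact ih n (p + 1) seen (by omega) hn1 hdvd (by omega)
          (fun q hq hqlt hqd => by
            by_cases hqp : (q : Int) = p
            · rw [hqp] at hqd
              exact hd hqd
            · exact hnofac q hq (by omega) hqd)
          (fun q hq hqge hqd => hkeep q hq (by omega) hqd)
          (by omega) (by rw [hsegsplit]; exact hseen)
    · have hstop : n < p * p := by omega
      have hexit : factorGo (fuel + 1) n p seen = (n, seen) := by
        show (if p * p ≤ n then
                if (PySem.Int.mod n p == 0)
                then factorGo fuel (stripGo p n.toNat n) (p + 1)
                  (if seen.contains p then seen else seen ++ [p])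
                else factorGo fuel n (p + 1) seen
              else (n, seen)) = _
        rw [if_neg hloop]
      rw [hexit]
      exact factor_exit u n p seen s0 hu hp2 hn1 hdvd hpb hnofac hkeep hstop hseen

theorem bStep_correct (seen : List Int) (u : Int) : bStep seen u = dedupExt seen (pListOf u) := by
  by_cases hu : u < 2
  · have hfe : factorGo (u.toNat + 2) u 2 seen = (u, seen) := by
      show (if (2 : Int) * 2 ≤ u then
              if (PySem.Int.mod u 2 == 0)
              then factorGo (u.toNat + 1) (stripGo 2 u.toNat u) (2 + 1)
                (if seen.contains 2 then seen else seen ++ [2])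
              else factorGo (u.toNat + 1) u (2 + 1) seen
            else (u, seen)) = _
      rw [if_neg (by omega)]
    unfold bStep
    rw [hfe]
    have hpl : pListOf u = [] := by
      unfold pListOf
      rw [if_pos hu]
    rw [hpl, dedupExt_nil]
    simp
    omega
  · have hu2 : 2 ≤ u := by omega
    have hseen0 : seen = dedupExt seen (pdSeg u.toNat 2 ((2 : Int).toNat - 2)) := by
      rw [show (2 : Int).toNat - 2 = 0 from rfl, pdSeg_zero, dedupExt_nil]
    exact factorGo_correct (u.toNat + 2) u u 2 seen seen hu2 (by omega) (by omega)
      (dvd_refl u) (by omega)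
      (fun q hq hlt _ => by have := hq.two_le; omega)
      (fun q _ _ hqd => hqd)
      (by omega) hseen0

theorem foldl_snoc_map (v : List Int) (f : Int → List Int) (acc : List (List Int)) :
    v.foldl (fun acc u => acc ++ [f u]) acc = acc ++ v.map f := by
  induction v generalizing acc with
  | nil => simp
  | cons x t ih => simp [List.foldl_cons, ih]

theorem step_fun_eq :
    (fun (nueva : List Int) (numero : Int) =>
        if !(esta_incluido numero nueva) then nueva ++ [numero] else nueva) =
      (fun (s : List Int) (x : Int) => if s.contains x then s else s ++ [x]) := by
  funext s x
  rw [esta_incluido_eq]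
  cases h : s.contains x <;> simp [h]

theorem unificar_eq (ls : List (List Int)) : unificar_lista ls = ls.foldl dedupExt [] := by
  unfold unificar_lista
  rw [step_fun_eq]
  rfl

theorem unified_eq (v : List Int) :
    unificar_lista (v.foldl (fun acc u => acc ++ [obtener_primos_que_dividen u]) []) =
      v.foldl bStep [] := by
  rw [foldl_snoc_map v obtener_primos_que_dividen [], List.nil_append, unificar_eq,
    List.foldl_map]
  have : (fun (s : List Int) (u : Int) => dedupExt s (obtener_primos_que_dividen u)) = bStep := by
    funext s u
    rw [obtener_correct, ← bStep_correct]
  rw [this]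

theorem dedupExt_nodup (s l : List Int) (hs : s.Nodup) : (dedupExt s l).Nodup := by
  induction l generalizing s with
  | nil => exact hs
  | cons x t ih =>
    show (dedupExt (if s.contains x then s else s ++ [x]) t).Nodup
    apply ih
    by_cases h : s.contains x
    · rw [if_pos h]
      exact hs
    · rw [if_neg h]
      have hx : x ∉ s := by simpa using h
      simp [List.nodup_append, hs]
      intro a ha hax
      exact hx (hax ▸ ha)

theorem overwrite_items (ks : List Int) (f : Int → Int) :
    ∀ (d : PySem.Dict Int Int), (∀ k ∈ ks, d.contains k = true) →
    (ks.foldl (fun d k => d.insert k (f k)) d).items =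
      d.items.map (fun p => if p.1 ∈ ks then (p.1, f p.1) else p) := by
  induction ks with
  | nil => intro d _; simp
  | cons k t ih =>
    intro d hc
    have hck : d.contains k = true := hc k List.mem_cons_self
    have h1 : (d.insert k (f k)).items =
        d.items.map (fun p => if p.1 == k then (k, f k) else p) :=
      PySem.Dict.items_insert_of_contains d (f k) hck
    have hc' : ∀ k' ∈ t, (d.insert k (f k)).contains k' = true := by
      intro k' hk'
      rw [PySem.Dict.contains_insert]
      simp [hc k' (List.mem_cons_of_mem _ hk')]
    show (t.foldl _ (d.insert k (f k))).items = _
    rw [ih (d.insert k (f k)) hc', h1, List.map_map]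
    have hcomp : ((fun p : Int × Int => if p.1 ∈ t then (p.1, f p.1) else p) ∘
        (fun p : Int × Int => if p.1 == k then (k, f k) else p)) =
        (fun p : Int × Int => if p.1 ∈ k :: t then (p.1, f p.1) else p) := by
      funext p
      by_cases hpk : p.1 = k
      · by_cases hpt : p.1 ∈ t <;> simp [Function.comp, hpk, hpt]
      · by_cases hpt : p.1 ∈ t <;> simp [Function.comp, hpk, hpt]
    rw [hcomp]

theorem dict_loops (keys : List Int) (v : List Int) (hnd : keys.Nodup) :
    ((keys.foldl (fun d numero => d.insert numero 0)
        (PySem.Dict.empty : PySem.Dict Int Int)).items.foldl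
      (fun d kv => d.insert kv.1 (cantidad_de_veces_que_dividie kv.1 v))
      (keys.foldl (fun d numero => d.insert numero 0) PySem.Dict.empty)).items =
      keys.map (fun k => (k, cantidad_de_veces_que_dividie k v)) := by
  have hfresh : (keys.foldl (fun d numero => d.insert numero 0)
      (PySem.Dict.empty : PySem.Dict Int Int)).items =
      (PySem.Dict.empty : PySem.Dict Int Int).items ++ keys.map (fun k => (k, (0 : Int))) :=
    PySem.Dict.items_foldl_insert_fresh keys (fun k => k) (fun _ => 0) _
      (fun a _ => PySem.Dict.contains_empty a) (by simpa using hnd)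
  rw [show ((PySem.Dict.empty : PySem.Dict Int Int)).items = [] from rfl, List.nil_append] at hfresh
  set res : PySem.Dict Int Int :=
    keys.foldl (fun d numero => d.insert numero 0) PySem.Dict.empty with hres
  have hfst : res.items.map Prod.fst = keys := by
    rw [hfresh, List.map_map]
    rw [show (Prod.fst ∘ fun k : Int => (k, (0 : Int))) = id from rfl, List.map_id]
  have hcont : ∀ k ∈ keys, res.contains k = true := by
    intro k hk
    rw [PySem.Dict.contains_iff_mem_keys]
    show k ∈ res.items.map Prod.fst
    rw [hfst]
    exact hk
  have hconv : res.items.foldl (fun d kv => d.insert kv.1 (cantidad_de_veces_que_dividie kv.1 v)) res =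
      keys.foldl (fun d k => d.insert k (cantidad_de_veces_que_dividie k v)) res := by
    rw [← hfst, List.foldl_map]
  rw [hconv, overwrite_items keys (fun k => cantidad_de_veces_que_dividie k v) res hcont, hfresh,
    List.map_map]
  apply List.map_congr_left
  intro a ha
  simp [ha]

theorem cantidad_eq_countDiv (p : Int) (v : List Int) :
    cantidad_de_veces_que_dividie p v = countDiv p v := by
  unfold cantidad_de_veces_que_dividie countDiv
  have h : ∀ (l : List Int) (c : Int),
      l.foldl (fun c numero => if PySem.Int.mod numero p == 0 then c + 1 else c) c =
        c + ((l.filter (fun x => PySem.Int.mod x p == 0)).length : Int) := by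
    intro l
    induction l with
    | nil => simp
    | cons x t ih =>
      intro c
      by_cases hx : (PySem.Int.mod x p == 0) = true
      · rw [List.foldl_cons,
          show (x :: t).filter (fun y => PySem.Int.mod y p == 0) =
            x :: t.filter (fun y => PySem.Int.mod y p == 0) from List.filter_cons_of_pos hx,
          if_pos hx, ih (c + 1), List.length_cons]
        push_cast
        ring
      · rw [List.foldl_cons,
          show (x :: t).filter (fun y => PySem.Int.mod y p == 0) =
            t.filter (fun y => PySem.Int.mod y p == 0) from List.filter_cons_of_neg hx,
          if_neg hx, ih c]
  simpa using h v 0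

theorem foldl_bStep_nodup (v : List Int) : (v.foldl bStep []).Nodup := by
  have h : ∀ (v acc : List Int), acc.Nodup → (v.foldl bStep acc).Nodup := by
    intro v
    induction v with
    | nil => exact fun acc h => h
    | cons x t ih =>
      intro acc h
      rw [List.foldl_cons]
      apply ih
      rw [bStep_correct]
      exact dedupExt_nodup _ _ h
  exact h v [] List.nodup_nil

-- ===== VERDICT (by name: the statement is the Claim_ definition above) =====
theorem multiplos_de_primos_spec : Claim_equal_multiplos_de_primos := by
  intro v _
  show multiplos_de_primos v = multiplos_de_primos_alt v
  simp only [multiplos_de_primos]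
  rw [unified_eq v, dict_loops (v.foldl bStep []) v (foldl_bStep_nodup v)]
  simp only [cantidad_eq_countDiv]
  rfl
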